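-- pv_equiv track=rewrite | github.com/tenstorrent/tt-inference-server | utils/prompt_client.py | get_trace_context_lens
-- ===== SOURCE A (Python) =====
-- from typing import List, Tuple, Optional
--
-- PADDED_SEQ_LENS = [
--     128,
--     256,
--     512,
--     1024,
--     2048,
--     4096,
--     8192,
--     16384,
--     32768 - 128,  # the - 128 is for models that have this as max context length
--     65536 - 128,
--     131072 - 128,
-- ]
--
-- def get_trace_context_lens(
--     max_context: int,
--     output_len: int = 4,
-- ) -> List[Tuple[int, int]]:
--     """Get trace context lengths filtered by model's max context length.
--
--     Args:
--         max_context: Maximum context length supported by the model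
--         output_len: Fixed output sequence length for trace capture
--
--     Returns:
--         List of (input_seq_len, output_seq_len) tuples
--     """
--     return [
--         (seq_len, output_len)
--         for seq_len in PADDED_SEQ_LENS
--         if (seq_len + output_len) <= max_context
--     ]
-- ===== SOURCE B (Python) =====
-- from typing import List, Tuple
--
-- PADDED_SEQ_LENS = [
--     128,
--     256,
--     512,
--     1024,
--     2048,
--     4096,
--     8192,
--     16384,
--     32768 - 128,
--     65536 - 128,
--     131072 - 128,
-- ]
--
-- def get_trace_context_lens(
--     max_context: int,
--     output_len: int = 4,
-- ) -> List[Tuple[int, int]]: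
--     """PADDED_SEQ_LENS is sorted ascending, so the kept elements are exactly a
--     prefix: binary-search the cutoff index (bisect_right) and slice."""
--     threshold = max_context - output_len
--     lo, hi = 0, len(PADDED_SEQ_LENS)
--     while lo < hi:
--         mid = (lo + hi) // 2
--         if PADDED_SEQ_LENS[mid] <= threshold:
--             lo = mid + 1
--         else:
--             hi = mid
--     return [(s, output_len) for s in PADDED_SEQ_LENS[:lo]]
-- ===== Notes on version B (the rewrite author's own statement) =====
-- stated objective: alternative
-- what changed: Replaces the linear filter over PADDED_SEQ_LENS with a binary search for the cutoff index (the list is sorted ascending, so the predicate is monotone) followed by a prefix slice.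
import Mathlib
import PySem

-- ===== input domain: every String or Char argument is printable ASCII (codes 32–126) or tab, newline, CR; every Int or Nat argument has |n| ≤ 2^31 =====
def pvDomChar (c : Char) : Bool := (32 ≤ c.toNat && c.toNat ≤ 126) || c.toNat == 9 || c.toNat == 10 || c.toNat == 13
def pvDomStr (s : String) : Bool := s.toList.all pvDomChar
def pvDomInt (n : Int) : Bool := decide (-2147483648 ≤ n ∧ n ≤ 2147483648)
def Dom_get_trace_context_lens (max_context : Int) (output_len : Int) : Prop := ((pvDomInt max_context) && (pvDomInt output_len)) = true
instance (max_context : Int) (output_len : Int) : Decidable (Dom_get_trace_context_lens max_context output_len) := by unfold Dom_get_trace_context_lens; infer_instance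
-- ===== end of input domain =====

-- B finds the cutoff by binary search over the sorted constant list instead of filtering it;
-- same output, alternative algorithm.

-- ===== PORT A =====
def PADDED_SEQ_LENS : List Int :=
  [128, 256, 512, 1024, 2048, 4096, 8192, 16384, 32768 - 128, 65536 - 128, 131072 - 128]

-- A: comprehension with a filter over PADDED_SEQ_LENS
def get_trace_context_lens (max_context : Int) (output_len : Int) : List (Int × Int) :=
  (PADDED_SEQ_LENS.filter (fun seq_len => seq_len + output_len ≤ max_context)).map
    (fun seq_len => (seq_len, output_len))

-- ===== PORT B =====
-- the while-loop of Source B's binary search; fuel = hi - lo bounds the iteration count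
def pvBisectLoop : Nat → Nat → Nat → Int → Nat
  | 0, lo, _, _ => lo
  | fuel + 1, lo, hi, threshold =>
    if lo < hi then
      let mid := (lo + hi) / 2
      if PADDED_SEQ_LENS.getD mid 0 ≤ threshold then
        pvBisectLoop fuel (mid + 1) hi threshold
      else
        pvBisectLoop fuel lo mid threshold
    else lo

def get_trace_context_lens_alt (max_context : Int) (output_len : Int) : List (Int × Int) :=
  let threshold := max_context - output_len
  let lo := pvBisectLoop PADDED_SEQ_LENS.length 0 PADDED_SEQ_LENS.length threshold
  (PADDED_SEQ_LENS.take lo).map (fun s => (s, output_len))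

-- ===== PRECONDITION & SPEC =====
def Spec_get_trace_context_lens (max_context : Int) (output_len : Int) (out : List (Int × Int)) : Prop := out = get_trace_context_lens_alt max_context output_len
instance (max_context : Int) (output_len : Int) (out : List (Int × Int)) : Decidable (Spec_get_trace_context_lens max_context output_len out) := by unfold Spec_get_trace_context_lens; infer_instance

-- ===== CLAIM (what is proved, stated in full; the proofs are below) =====
def Claim_equal_get_trace_context_lens : Prop := ∀ (max_context : Int) (output_len : Int), Dom_get_trace_context_lens max_context output_len → Spec_get_trace_context_lens max_context output_len (get_trace_context_lens max_context output_len)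

-- ===== LEMMAS AND PROOFS =====

theorem key (m o : Int) :
    PADDED_SEQ_LENS.filter (fun s => s + o ≤ m) =
      PADDED_SEQ_LENS.take (pvBisectLoop PADDED_SEQ_LENS.length 0 PADDED_SEQ_LENS.length (m - o)) := by
  rcases Int.lt_or_le (m - o) 128 with h0 | h0
  ·
    have f0 : ((128:Int) ≤ m - o) = False := by simp; omega
    have g0 : ((128:Int) + o ≤ m) = False := by simp; omega
    have f1 : ((256:Int) ≤ m - o) = False := by simp; omega
    have g1 : ((256:Int) + o ≤ m) = False := by simp; omega
    have f2 : ((512:Int) ≤ m - o) = False := by simp; omega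
    have g2 : ((512:Int) + o ≤ m) = False := by simp; omega
    have g3 : ((1024:Int) + o ≤ m) = False := by simp; omega
    have g4 : ((2048:Int) + o ≤ m) = False := by simp; omega
    have f5 : ((4096:Int) ≤ m - o) = False := by simp; omega
    have g5 : ((4096:Int) + o ≤ m) = False := by simp; omega
    have g6 : ((8192:Int) + o ≤ m) = False := by simp; omega
    have g7 : ((16384:Int) + o ≤ m) = False := by simp; omega
    have g8 : ((32640:Int) + o ≤ m) = False := by simp; omega
    have g9 : ((65408:Int) + o ≤ m) = False := by simp; omega
    have g10 : ((130944:Int) + o ≤ m) = False := by simp; omega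
    simp [pvBisectLoop, PADDED_SEQ_LENS, List.getD, f0, g0, f1, g1, f2, g2, g3, g4, f5, g5, g6, g7, g8, g9, g10]
  rcases Int.lt_or_le (m - o) 256 with h1 | h1
  ·
    have f0 : ((128:Int) ≤ m - o) = True := by simp; omega
    have g0 : ((128:Int) + o ≤ m) = True := by simp; omega
    have f1 : ((256:Int) ≤ m - o) = False := by simp; omega
    have g1 : ((256:Int) + o ≤ m) = False := by simp; omega
    have f2 : ((512:Int) ≤ m - o) = False := by simp; omega
    have g2 : ((512:Int) + o ≤ m) = False := by simp; omega
    have g3 : ((1024:Int) + o ≤ m) = False := by simp; omega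
    have g4 : ((2048:Int) + o ≤ m) = False := by simp; omega
    have f5 : ((4096:Int) ≤ m - o) = False := by simp; omega
    have g5 : ((4096:Int) + o ≤ m) = False := by simp; omega
    have g6 : ((8192:Int) + o ≤ m) = False := by simp; omega
    have g7 : ((16384:Int) + o ≤ m) = False := by simp; omega
    have g8 : ((32640:Int) + o ≤ m) = False := by simp; omega
    have g9 : ((65408:Int) + o ≤ m) = False := by simp; omega
    have g10 : ((130944:Int) + o ≤ m) = False := by simp; omega
    simp [pvBisectLoop, PADDED_SEQ_LENS, List.getD, f0, g0, f1, g1, f2, g2, g3, g4, f5, g5, g6, g7, g8, g9, g10]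
  rcases Int.lt_or_le (m - o) 512 with h2 | h2
  ·
    have g0 : ((128:Int) + o ≤ m) = True := by simp; omega
    have f1 : ((256:Int) ≤ m - o) = True := by simp; omega
    have g1 : ((256:Int) + o ≤ m) = True := by simp; omega
    have f2 : ((512:Int) ≤ m - o) = False := by simp; omega
    have g2 : ((512:Int) + o ≤ m) = False := by simp; omega
    have g3 : ((1024:Int) + o ≤ m) = False := by simp; omega
    have g4 : ((2048:Int) + o ≤ m) = False := by simp; omega
    have f5 : ((4096:Int) ≤ m - o) = False := by simp; omega
    have g5 : ((4096:Int) + o ≤ m) = False := by simp; omega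
    have g6 : ((8192:Int) + o ≤ m) = False := by simp; omega
    have g7 : ((16384:Int) + o ≤ m) = False := by simp; omega
    have g8 : ((32640:Int) + o ≤ m) = False := by simp; omega
    have g9 : ((65408:Int) + o ≤ m) = False := by simp; omega
    have g10 : ((130944:Int) + o ≤ m) = False := by simp; omega
    simp [pvBisectLoop, PADDED_SEQ_LENS, List.getD, g0, f1, g1, f2, g2, g3, g4, f5, g5, g6, g7, g8, g9, g10]
  rcases Int.lt_or_le (m - o) 1024 with h3 | h3
  ·
    have g0 : ((128:Int) + o ≤ m) = True := by simp; omega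
    have g1 : ((256:Int) + o ≤ m) = True := by simp; omega
    have f2 : ((512:Int) ≤ m - o) = True := by simp; omega
    have g2 : ((512:Int) + o ≤ m) = True := by simp; omega
    have f3 : ((1024:Int) ≤ m - o) = False := by simp; omega
    have g3 : ((1024:Int) + o ≤ m) = False := by simp; omega
    have f4 : ((2048:Int) ≤ m - o) = False := by simp; omega
    have g4 : ((2048:Int) + o ≤ m) = False := by simp; omega
    have f5 : ((4096:Int) ≤ m - o) = False := by simp; omega
    have g5 : ((4096:Int) + o ≤ m) = False := by simp; omega
    have g6 : ((8192:Int) + o ≤ m) = False := by simp; omega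
    have g7 : ((16384:Int) + o ≤ m) = False := by simp; omega
    have g8 : ((32640:Int) + o ≤ m) = False := by simp; omega
    have g9 : ((65408:Int) + o ≤ m) = False := by simp; omega
    have g10 : ((130944:Int) + o ≤ m) = False := by simp; omega
    simp [pvBisectLoop, PADDED_SEQ_LENS, List.getD, g0, g1, f2, g2, f3, g3, f4, g4, f5, g5, g6, g7, g8, g9, g10]
  rcases Int.lt_or_le (m - o) 2048 with h4 | h4
  ·
    have g0 : ((128:Int) + o ≤ m) = True := by simp; omega
    have g1 : ((256:Int) + o ≤ m) = True := by simp; omega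
    have f2 : ((512:Int) ≤ m - o) = True := by simp; omega
    have g2 : ((512:Int) + o ≤ m) = True := by simp; omega
    have f3 : ((1024:Int) ≤ m - o) = True := by simp; omega
    have g3 : ((1024:Int) + o ≤ m) = True := by simp; omega
    have f4 : ((2048:Int) ≤ m - o) = False := by simp; omega
    have g4 : ((2048:Int) + o ≤ m) = False := by simp; omega
    have f5 : ((4096:Int) ≤ m - o) = False := by simp; omega
    have g5 : ((4096:Int) + o ≤ m) = False := by simp; omega
    have g6 : ((8192:Int) + o ≤ m) = False := by simp; omega
    have g7 : ((16384:Int) + o ≤ m) = False := by simp; omega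
    have g8 : ((32640:Int) + o ≤ m) = False := by simp; omega
    have g9 : ((65408:Int) + o ≤ m) = False := by simp; omega
    have g10 : ((130944:Int) + o ≤ m) = False := by simp; omega
    simp [pvBisectLoop, PADDED_SEQ_LENS, List.getD, g0, g1, f2, g2, f3, g3, f4, g4, f5, g5, g6, g7, g8, g9, g10]
  rcases Int.lt_or_le (m - o) 4096 with h5 | h5
  ·
    have g0 : ((128:Int) + o ≤ m) = True := by simp; omega
    have g1 : ((256:Int) + o ≤ m) = True := by simp; omega
    have f2 : ((512:Int) ≤ m - o) = True := by simp; omega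
    have g2 : ((512:Int) + o ≤ m) = True := by simp; omega
    have g3 : ((1024:Int) + o ≤ m) = True := by simp; omega
    have f4 : ((2048:Int) ≤ m - o) = True := by simp; omega
    have g4 : ((2048:Int) + o ≤ m) = True := by simp; omega
    have f5 : ((4096:Int) ≤ m - o) = False := by simp; omega
    have g5 : ((4096:Int) + o ≤ m) = False := by simp; omega
    have g6 : ((8192:Int) + o ≤ m) = False := by simp; omega
    have g7 : ((16384:Int) + o ≤ m) = False := by simp; omega
    have g8 : ((32640:Int) + o ≤ m) = False := by simp; omega
    have g9 : ((65408:Int) + o ≤ m) = False := by simp; omega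
    have g10 : ((130944:Int) + o ≤ m) = False := by simp; omega
    simp [pvBisectLoop, PADDED_SEQ_LENS, List.getD, g0, g1, f2, g2, g3, f4, g4, f5, g5, g6, g7, g8, g9, g10]
  rcases Int.lt_or_le (m - o) 8192 with h6 | h6
  ·
    have g0 : ((128:Int) + o ≤ m) = True := by simp; omega
    have g1 : ((256:Int) + o ≤ m) = True := by simp; omega
    have g2 : ((512:Int) + o ≤ m) = True := by simp; omega
    have g3 : ((1024:Int) + o ≤ m) = True := by simp; omega
    have g4 : ((2048:Int) + o ≤ m) = True := by simp; omega
    have f5 : ((4096:Int) ≤ m - o) = True := by simp; omega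
    have g5 : ((4096:Int) + o ≤ m) = True := by simp; omega
    have f6 : ((8192:Int) ≤ m - o) = False := by simp; omega
    have g6 : ((8192:Int) + o ≤ m) = False := by simp; omega
    have f7 : ((16384:Int) ≤ m - o) = False := by simp; omega
    have g7 : ((16384:Int) + o ≤ m) = False := by simp; omega
    have f8 : ((32640:Int) ≤ m - o) = False := by simp; omega
    have g8 : ((32640:Int) + o ≤ m) = False := by simp; omega
    have g9 : ((65408:Int) + o ≤ m) = False := by simp; omega
    have g10 : ((130944:Int) + o ≤ m) = False := by simp; omega
    simp [pvBisectLoop, PADDED_SEQ_LENS, List.getD, g0, g1, g2, g3, g4, f5, g5, f6, g6, f7, g7, f8, g8, g9, g10]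
  rcases Int.lt_or_le (m - o) 16384 with h7 | h7
  ·
    have g0 : ((128:Int) + o ≤ m) = True := by simp; omega
    have g1 : ((256:Int) + o ≤ m) = True := by simp; omega
    have g2 : ((512:Int) + o ≤ m) = True := by simp; omega
    have g3 : ((1024:Int) + o ≤ m) = True := by simp; omega
    have g4 : ((2048:Int) + o ≤ m) = True := by simp; omega
    have f5 : ((4096:Int) ≤ m - o) = True := by simp; omega
    have g5 : ((4096:Int) + o ≤ m) = True := by simp; omega
    have f6 : ((8192:Int) ≤ m - o) = True := by simp; omega
    have g6 : ((8192:Int) + o ≤ m) = True := by simp; omega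
    have f7 : ((16384:Int) ≤ m - o) = False := by simp; omega
    have g7 : ((16384:Int) + o ≤ m) = False := by simp; omega
    have f8 : ((32640:Int) ≤ m - o) = False := by simp; omega
    have g8 : ((32640:Int) + o ≤ m) = False := by simp; omega
    have g9 : ((65408:Int) + o ≤ m) = False := by simp; omega
    have g10 : ((130944:Int) + o ≤ m) = False := by simp; omega
    simp [pvBisectLoop, PADDED_SEQ_LENS, List.getD, g0, g1, g2, g3, g4, f5, g5, f6, g6, f7, g7, f8, g8, g9, g10]
  rcases Int.lt_or_le (m - o) 32640 with h8 | h8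
  ·
    have g0 : ((128:Int) + o ≤ m) = True := by simp; omega
    have g1 : ((256:Int) + o ≤ m) = True := by simp; omega
    have g2 : ((512:Int) + o ≤ m) = True := by simp; omega
    have g3 : ((1024:Int) + o ≤ m) = True := by simp; omega
    have g4 : ((2048:Int) + o ≤ m) = True := by simp; omega
    have f5 : ((4096:Int) ≤ m - o) = True := by simp; omega
    have g5 : ((4096:Int) + o ≤ m) = True := by simp; omega
    have g6 : ((8192:Int) + o ≤ m) = True := by simp; omega
    have f7 : ((16384:Int) ≤ m - o) = True := by simp; omega
    have g7 : ((16384:Int) + o ≤ m) = True := by simp; omega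
    have f8 : ((32640:Int) ≤ m - o) = False := by simp; omega
    have g8 : ((32640:Int) + o ≤ m) = False := by simp; omega
    have g9 : ((65408:Int) + o ≤ m) = False := by simp; omega
    have g10 : ((130944:Int) + o ≤ m) = False := by simp; omega
    simp [pvBisectLoop, PADDED_SEQ_LENS, List.getD, g0, g1, g2, g3, g4, f5, g5, g6, f7, g7, f8, g8, g9, g10]
  rcases Int.lt_or_le (m - o) 65408 with h9 | h9
  ·
    have g0 : ((128:Int) + o ≤ m) = True := by simp; omega
    have g1 : ((256:Int) + o ≤ m) = True := by simp; omega
    have g2 : ((512:Int) + o ≤ m) = True := by simp; omega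
    have g3 : ((1024:Int) + o ≤ m) = True := by simp; omega
    have g4 : ((2048:Int) + o ≤ m) = True := by simp; omega
    have f5 : ((4096:Int) ≤ m - o) = True := by simp; omega
    have g5 : ((4096:Int) + o ≤ m) = True := by simp; omega
    have g6 : ((8192:Int) + o ≤ m) = True := by simp; omega
    have g7 : ((16384:Int) + o ≤ m) = True := by simp; omega
    have f8 : ((32640:Int) ≤ m - o) = True := by simp; omega
    have g8 : ((32640:Int) + o ≤ m) = True := by simp; omega
    have f9 : ((65408:Int) ≤ m - o) = False := by simp; omega
    have g9 : ((65408:Int) + o ≤ m) = False := by simp; omega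
    have f10 : ((130944:Int) ≤ m - o) = False := by simp; omega
    have g10 : ((130944:Int) + o ≤ m) = False := by simp; omega
    simp [pvBisectLoop, PADDED_SEQ_LENS, List.getD, g0, g1, g2, g3, g4, f5, g5, g6, g7, f8, g8, f9, g9, f10, g10]
  rcases Int.lt_or_le (m - o) 130944 with h10 | h10
  ·
    have g0 : ((128:Int) + o ≤ m) = True := by simp; omega
    have g1 : ((256:Int) + o ≤ m) = True := by simp; omega
    have g2 : ((512:Int) + o ≤ m) = True := by simp; omega
    have g3 : ((1024:Int) + o ≤ m) = True := by simp; omega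
    have g4 : ((2048:Int) + o ≤ m) = True := by simp; omega
    have f5 : ((4096:Int) ≤ m - o) = True := by simp; omega
    have g5 : ((4096:Int) + o ≤ m) = True := by simp; omega
    have g6 : ((8192:Int) + o ≤ m) = True := by simp; omega
    have g7 : ((16384:Int) + o ≤ m) = True := by simp; omega
    have f8 : ((32640:Int) ≤ m - o) = True := by simp; omega
    have g8 : ((32640:Int) + o ≤ m) = True := by simp; omega
    have f9 : ((65408:Int) ≤ m - o) = True := by simp; omega
    have g9 : ((65408:Int) + o ≤ m) = True := by simp; omega
    have f10 : ((130944:Int) ≤ m - o) = False := by simp; omega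
    have g10 : ((130944:Int) + o ≤ m) = False := by simp; omega
    simp [pvBisectLoop, PADDED_SEQ_LENS, List.getD, g0, g1, g2, g3, g4, f5, g5, g6, g7, f8, g8, f9, g9, f10, g10]
  have g0 : ((128:Int) + o ≤ m) = True := by simp; omega
  have g1 : ((256:Int) + o ≤ m) = True := by simp; omega
  have g2 : ((512:Int) + o ≤ m) = True := by simp; omega
  have g3 : ((1024:Int) + o ≤ m) = True := by simp; omega
  have g4 : ((2048:Int) + o ≤ m) = True := by simp; omega
  have f5 : ((4096:Int) ≤ m - o) = True := by simp; omega
  have g5 : ((4096:Int) + o ≤ m) = True := by simp; omega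
  have g6 : ((8192:Int) + o ≤ m) = True := by simp; omega
  have g7 : ((16384:Int) + o ≤ m) = True := by simp; omega
  have f8 : ((32640:Int) ≤ m - o) = True := by simp; omega
  have g8 : ((32640:Int) + o ≤ m) = True := by simp; omega
  have g9 : ((65408:Int) + o ≤ m) = True := by simp; omega
  have f10 : ((130944:Int) ≤ m - o) = True := by simp; omega
  have g10 : ((130944:Int) + o ≤ m) = True := by simp; omega
  simp [pvBisectLoop, PADDED_SEQ_LENS, List.getD, g0, g1, g2, g3, g4, f5, g5, g6, g7, f8, g8, g9, f10, g10]
-- ===== VERDICT (by name: the statement is the Claim_ definition above) =====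
theorem get_trace_context_lens_spec : Claim_equal_get_trace_context_lens := by
  intro m o _
  unfold Spec_get_trace_context_lens get_trace_context_lens get_trace_context_lens_alt
  rw [key]
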